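-- pv_equiv track=rewrite | github.com/Zergio/Calendar | calendar.py | days_till_year
-- ===== SOURCE A (Python) =====
-- def is_leap_year(year):
--     return (year % 4 == 0 and year % 100 != 0) or year % 400 == 0
--
-- def days_till_year(year):
--     num = 0
--     for y in range(1, year):
--         if is_leap_year(y):
--             num += 366
--         else:
--             num += 365
--     return num
-- ===== SOURCE B (Python) =====
-- def days_till_year(year):
--     n = max(year - 1, 0)
--     return 365 * n + n // 4 - n // 100 + n // 400
-- ===== Notes on version B (the rewrite author's own statement) =====
-- stated objective: faster
-- what changed: Replaced the per-year loop with the closed form 365*n + n//4 - n//100 + n//400 for n = max(year-1, 0) complete years elapsed.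
import Mathlib
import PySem

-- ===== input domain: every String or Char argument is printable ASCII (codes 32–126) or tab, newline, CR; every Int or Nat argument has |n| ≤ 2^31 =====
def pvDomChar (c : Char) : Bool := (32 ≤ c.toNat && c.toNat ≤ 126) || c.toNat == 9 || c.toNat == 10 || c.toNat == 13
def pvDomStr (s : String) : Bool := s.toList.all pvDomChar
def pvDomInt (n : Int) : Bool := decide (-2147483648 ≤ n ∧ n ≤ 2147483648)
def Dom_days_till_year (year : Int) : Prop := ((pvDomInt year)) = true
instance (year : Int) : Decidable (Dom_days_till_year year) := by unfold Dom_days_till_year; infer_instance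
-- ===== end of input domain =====

-- B replaces A's per-year loop with the closed form 365*n + n//4 - n//100 + n//400, n = max(year-1,0) (faster: O(1) vs O(year)).

-- ===== PORT A =====
def is_leap_year (year : Int) : Bool :=
  (PySem.Int.mod year 4 == 0 && PySem.Int.mod year 100 != 0) || PySem.Int.mod year 400 == 0

def days_till_year (year : Int) : Int :=
  (PySem.List.pyRange 1 year 1).foldl
    (fun num y => if is_leap_year y then num + 366 else num + 365) 0

-- ===== PORT B =====
def days_till_year_alt (year : Int) : Int :=
  let n := max (year - 1) 0
  365 * n + PySem.Int.floordiv n 4 - PySem.Int.floordiv n 100 + PySem.Int.floordiv n 400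

-- ===== PRECONDITION & SPEC =====
def Spec_days_till_year (year : Int) (out : Int) : Prop := out = days_till_year_alt year
instance (year : Int) (out : Int) : Decidable (Spec_days_till_year year out) := by unfold Spec_days_till_year; infer_instance

-- ===== CLAIM (what is proved, stated in full; the proofs are below) =====
def Claim_equal_days_till_year : Prop := ∀ (year : Int), Dom_days_till_year year → Spec_days_till_year year (days_till_year year)

-- ===== LEMMAS AND PROOFS =====

-- closed form of B at a nonnegative n, floordiv turned into Int ediv
theorem alt_formula (n : Int) (hn : 0 ≤ n) :
    days_till_year_alt (n + 1) = 365 * n + n / 4 - n / 100 + n / 400 := by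
  simp only [days_till_year_alt,
    PySem.Int.floordiv_eq_ediv_of_pos (show (0:Int) < 4 by omega),
    PySem.Int.floordiv_eq_ediv_of_pos (show (0:Int) < 100 by omega),
    PySem.Int.floordiv_eq_ediv_of_pos (show (0:Int) < 400 by omega)]
  rw [show max (n + 1 - 1) 0 = n by omega]

-- peel the last year off A's loop
theorem days_till_year_succ (y : Int) (hy : 1 ≤ y) :
    days_till_year (y + 1) =
      days_till_year y + (if is_leap_year y then 366 else 365) := by
  unfold days_till_year
  rw [PySem.List.pyRange_one_succ_right hy, List.foldl_append]
  simp only [List.foldl]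
  split <;> rfl

theorem main_lemma (k : Nat) :
    days_till_year ((k : Int) + 1) = days_till_year_alt ((k : Int) + 1) := by
  induction k with
  | zero =>
    decide
  | succ m ih =>
    have h1 : ((m + 1 : Nat) : Int) + 1 = ((m : Int) + 1) + 1 := by push_cast; ring
    rw [h1, days_till_year_succ _ (by omega), ih,
        alt_formula ((m : Int) + 1) (by omega), alt_formula (m : Int) (by omega)]
    by_cases h4 : ((m : Int) + 1) % 4 = 0 <;> by_cases h100 : ((m : Int) + 1) % 100 = 0 <;>
      by_cases h400 : ((m : Int) + 1) % 400 = 0 <;>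
      simp [is_leap_year, h4, h100, h400] <;> omega

-- ===== VERDICT (by name: the statement is the Claim_ definition above) =====
theorem days_till_year_spec : Claim_equal_days_till_year := by
  intro year _
  unfold Spec_days_till_year
  by_cases hy : 1 ≤ year
  · obtain ⟨k, hk⟩ : ∃ k : Nat, year = (k : Int) + 1 :=
      ⟨(year - 1).toNat, by omega⟩
    rw [hk]; exact main_lemma k
  · have hA : days_till_year year = 0 := by
      unfold days_till_year
      rw [PySem.List.pyRange_one_eq_nil (by omega)]
      rfl
    have hB : days_till_year_alt year = 0 := by
      unfold days_till_year_alt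
      rw [max_eq_right (by omega : year - 1 ≤ 0)]
      rfl
    rw [hA, hB]
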